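-- pv_equiv track=rewrite | github.com/varenik17/TSP-team | tsp/helpers.py | edges_to_tour
-- ===== SOURCE A (Python) =====
-- from typing import List, Tuple, Set, Optional
--
-- Edge = Tuple[int, int]
--
-- def adjacency_list(n: int, edges: Set[Edge]) -> List[List[int]]:
--     adj = [[] for _ in range(n)]
--     for a, b in edges:
--         adj[a].append(b)
--         adj[b].append(a)
--     return adj
--
-- def single_tour_check(n: int, edges: Set[Edge]) -> bool:
--     if len(edges) != n:
--         return False
--
--     adj = adjacency_list(n, edges)
--     for v in range(n):
--         if len(adj[v]) != 2:
--             return False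
--
--     seen = set()
--     stack = [0]
--     while stack:
--         v = stack.pop()
--         if v in seen:
--             continue
--         seen.add(v)
--         stack.extend(adj[v])
--
--     return len(seen) == n
--
-- def edges_to_tour(n: int, edges: Set[Edge]) -> Optional[List[int]]:
--     if not single_tour_check(n, edges):
--         return None
--
--     adj = adjacency_list(n, edges)
--
--     tour = [0]
--     prev = -1
--     curr = 0
--
--     while True:
--         nxt_candidates = [u for u in adj[curr] if u != prev]
--         if not nxt_candidates:
--             return None
--         nxt = nxt_candidates[0]
--
--         if nxt == 0:
--             break
--
--         tour.append(nxt)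
--         prev, curr = curr, nxt
--
--         if len(tour) > n:
--             return None
--
--     return tour if len(tour) == n else None
-- ===== SOURCE B (Python) =====
-- def edges_to_tour(n, edges):
--     if len(edges) != n:
--         return None
--
--     adj = [[] for _ in range(n)]
--     for a, b in edges:
--         adj[a].append(b)
--         adj[b].append(a)
--
--     if any(len(nbrs) != 2 for nbrs in adj):
--         return None
--
--     # Walk the cycle from vertex 0; single-cycle validity follows from the
--     # walk covering exactly n vertices, so no separate connectivity pass.
--     tour = []
--     prev, curr = -1, 0
--     while curr != 0 or not tour:
--         if len(tour) >= n:
--             return None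
--         tour.append(curr)
--         x, y = adj[curr]
--         nxt = y if x == prev else x
--         if nxt == prev:
--             return None
--         prev, curr = curr, nxt
--
--     return tour if len(tour) == n else None
-- ===== Notes on version B (the rewrite author's own statement) =====
-- stated objective: simpler
-- what changed: B drops A's entire DFS connectivity pass (stack + seen set): after the edge-count and degree-2 checks it walks the cycle from vertex 0 directly and derives single-cycle validity from the walk covering exactly n vertices, with the walk restructured (explicit two-slot successor choice and a while-condition loop instead of A's candidate-list filter with break).
-- outside the precondition, e.g. on edges_to_tour(1, {(-1, 0)}): A returns None, B returns [0]; on edges_to_tour(2, {(0, 2), (2, 0)}): A raises IndexError, B raises IndexError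
import Mathlib
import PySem

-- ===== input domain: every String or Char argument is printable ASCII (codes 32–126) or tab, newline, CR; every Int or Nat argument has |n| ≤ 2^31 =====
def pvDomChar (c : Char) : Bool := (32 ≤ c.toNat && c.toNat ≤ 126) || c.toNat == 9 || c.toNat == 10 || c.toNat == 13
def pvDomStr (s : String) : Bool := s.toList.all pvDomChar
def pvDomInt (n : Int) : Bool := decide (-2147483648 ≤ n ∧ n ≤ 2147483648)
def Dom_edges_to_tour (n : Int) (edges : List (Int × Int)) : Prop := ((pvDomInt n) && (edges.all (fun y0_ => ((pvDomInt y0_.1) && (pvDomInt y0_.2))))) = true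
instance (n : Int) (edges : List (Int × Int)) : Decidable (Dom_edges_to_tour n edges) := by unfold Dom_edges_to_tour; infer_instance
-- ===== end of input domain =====

-- B removes A's separate DFS connectivity pass (stack + seen set): single-cycle validity is derived
-- from the cycle walk itself covering exactly n vertices (objective: simpler — one pass less).

-- ===== PORT A =====

-- adj[i]   (Python list indexing; exact for -len ≤ i < len, IndexError outside — excluded by Pre_)
def pvAdjGet (adj : List (List Int)) (i : Int) : List Int :=
  PySem.List.pyGetD adj i []

-- adj[i].append(v)   (same indexing rule as pvAdjGet)
def pvAdjApp (adj : List (List Int)) (i : Int) (v : Int) : List (List Int) :=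
  PySem.List.pySetD adj i (PySem.List.pyGetD adj i [] ++ [v])

def adjacency_list (n : Int) (edges : List (Int × Int)) : List (List Int) :=
  edges.foldl (fun adj e => pvAdjApp (pvAdjApp adj e.1 e.2) e.2 e.1) (List.replicate n.toNat [])

-- 'while stack: v = stack.pop(); …'; fuel 2*n+2 bounds the iterations (each pop removes one item,
-- each newly seen vertex pushes its 2 neighbours) — proved sufficient in the lemmas below
def pvDfs (adj : List (List Int)) : Nat → List Int → PySem.Set Int → PySem.Set Int
  | 0, _, seen => seen
  | fuel+1, stack, seen =>
    match PySem.List.pop? stack with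
    | none => seen
    | some (v, stack') =>
      if PySem.Set.contains seen v then pvDfs adj fuel stack' seen
      else pvDfs adj fuel (stack' ++ pvAdjGet adj v) (PySem.Set.add seen v)

def single_tour_check (n : Int) (edges : List (Int × Int)) : Bool :=
  if (edges.length : Int) ≠ n then false
  else
    let adj := adjacency_list n edges
    if (PySem.List.pyRange 0 n).any (fun v => (pvAdjGet adj v).length != 2) then false
    else
      let seen := pvDfs adj (2 * n.toNat + 2) [0] PySem.Set.empty
      ((seen.length : Int) == n)

-- 'while True: …'; the loop appends once per iteration and aborts past length n, so fuel n+1 suffices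
def pvWalkA (adj : List (List Int)) (n : Int) : Nat → List Int → Int → Int → Option (List Int)
  | 0, _, _, _ => none
  | fuel+1, tour, prev, curr =>
    match (pvAdjGet adj curr).filter (fun u => u != prev) with
    | [] => none
    | nxt :: _ =>
      if nxt = 0 then (if (tour.length : Int) = n then some tour else none)
      else
        let tour' := tour ++ [nxt]
        if (tour'.length : Int) > n then none
        else pvWalkA adj n fuel tour' curr nxt

def edges_to_tour (n : Int) (edges : List (Int × Int)) : Option (List Int) :=
  if !single_tour_check n edges then none
  else
    let adj := adjacency_list n edges
    pvWalkA adj n (n.toNat + 1) [0] (-1) 0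

-- ===== PORT B =====

-- B's walk: 'while curr != 0 or not tour: …'; appends once per iteration, fuel n+2 suffices.
-- 'x, y = adj[curr]' is the two-element unpack; the fallthrough '_' branch (unpack of a list of
-- length ≠ 2) is unreachable after the degree check on the admitted inputs.
def pvWalkB (adj : List (List Int)) (n : Int) : Nat → List Int → Int → Int → Option (List Int)
  | 0, _, _, _ => none
  | fuel+1, tour, prev, curr =>
    if curr ≠ 0 ∨ tour = [] then
      if (tour.length : Int) ≥ n then none
      else
        let tour' := tour ++ [curr]
        match pvAdjGet adj curr with
        | [x, y] =>
          let nxt := if x = prev then y else x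
          if nxt = prev then none
          else pvWalkB adj n fuel tour' curr nxt
        | _ => none
    else
      if (tour.length : Int) = n then some tour else none

def edges_to_tour_alt (n : Int) (edges : List (Int × Int)) : Option (List Int) :=
  if (edges.length : Int) ≠ n then none
  else
    let adj := edges.foldl (fun adj e => pvAdjApp (pvAdjApp adj e.1 e.2) e.2 e.1) (List.replicate n.toNat [])
    if adj.any (fun nbrs => nbrs.length != 2) then none
    else pvWalkB adj n (n.toNat + 2) [] (-1) 0

-- ===== PRECONDITION & SPEC =====

-- Pre_ restricts the inputs that reach the adjacency build (those with len(edges) == n) to the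
-- function's natural domain: n ≥ 1 and vertex labels 0..n-1.  Outside it A either raises IndexError
-- (n = 0, or a label outside [-n, n)) or returns a value only through Python's accidental
-- negative-index wraparound on 'adj[a]'.
def Pre_edges_to_tour (n : Int) (edges : List (Int × Int)) : Prop :=
  (edges.length : Int) = n → (1 ≤ n ∧ ∀ e ∈ edges, 0 ≤ e.1 ∧ e.1 < n ∧ 0 ≤ e.2 ∧ e.2 < n)
instance (n : Int) (edges : List (Int × Int)) : Decidable (Pre_edges_to_tour n edges) := by
  unfold Pre_edges_to_tour; infer_instance

def pvWitness_edges_to_tour : Int × (List (Int × Int)) := (3, [(0, 1), (1, 2), (2, 0)])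

def Spec_edges_to_tour (n : Int) (edges : List (Int × Int)) (out : Option (List Int)) : Prop :=
  out = edges_to_tour_alt n edges
instance (n : Int) (edges : List (Int × Int)) (out : Option (List Int)) : Decidable (Spec_edges_to_tour n edges out) := by
  unfold Spec_edges_to_tour; infer_instance

-- ===== CLAIM (what is proved, stated in full; the proofs are below) =====
def Claim_equal_edges_to_tour : Prop := ∀ (n : Int) (edges : List (Int × Int)), Dom_edges_to_tour n edges → Pre_edges_to_tour n edges → Spec_edges_to_tour n edges (edges_to_tour n edges)

-- ===== LEMMAS AND PROOFS =====

theorem pvAdjApp_length (acc : List (List Int)) (p v : Int) :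
    (pvAdjApp acc p v).length = acc.length := by
  unfold pvAdjApp
  simp [PySem.List.length_pySetD]

theorem pvAdjGet_app (acc : List (List Int)) (n p q v : Int) (hacc : acc.length = n.toNat)
    (hp0 : 0 ≤ p) (hp1 : p < n) (hq0 : 0 ≤ q) (hq1 : q < n) :
    pvAdjGet (pvAdjApp acc p v) q =
      if q = p then pvAdjGet acc p ++ [v] else pvAdjGet acc q := by
  have hlen : ((acc.length : Int)) = n := by rw [hacc]; omega
  unfold pvAdjApp pvAdjGet
  rw [PySem.List.pySetD_of_nonneg _ _ hp0]
  rw [PySem.List.pyGetD_eq_getElem _ _ hp0 (by omega),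
      PySem.List.pyGetD_eq_getElem _ _ hq0 (by simp [List.length_set]; omega),
      PySem.List.pyGetD_eq_getElem _ _ hq0 (by omega)]
  rw [List.getElem_set]
  by_cases h : q = p
  · subst h; simp
  · have : p.toNat ≠ q.toNat := by omega
    simp [this, h]

theorem pvAdjGet_replicate (n q : Int) (hq0 : 0 ≤ q) (hq1 : q < n) :
    pvAdjGet (List.replicate n.toNat ([] : List Int)) q = [] := by
  unfold pvAdjGet
  rw [PySem.List.pyGetD_eq_getElem _ _ hq0 (by simp; omega)]
  simp

theorem pvAdjApp_range (acc : List (List Int)) (p v : Int) (hp : 0 ≤ p) (P : Int → Prop)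
    (h3 : ∀ L ∈ acc, ∀ x ∈ L, P x) (hv : P v) :
    ∀ L ∈ pvAdjApp acc p v, ∀ x ∈ L, P x := by
  unfold pvAdjApp
  rw [PySem.List.pySetD_of_nonneg _ _ hp]
  intro L hL x hx
  rcases List.mem_or_eq_of_mem_set hL with h | h
  · exact h3 L h x hx
  · subst h
    rcases List.mem_append.1 hx with hx | hx
    · by_cases hin : PySem.Raise.InRange acc.length p
      · exact h3 _ (PySem.List.pyGetD_mem acc [] hin) x hx
      · rw [PySem.List.pyGetD_of_none acc p [] ((PySem.List.pyGet?_eq_none_iff acc p).2 hin)] at hx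
        simp at hx
    · simp at hx; subst hx; exact hv

theorem pvCount_app (acc : List (List Int)) (n p q v w : Int) (hacc : acc.length = n.toNat)
    (hp0 : 0 ≤ p) (hp1 : p < n) (hq0 : 0 ≤ q) (hq1 : q < n) :
    ((pvAdjGet (pvAdjApp acc p v) q).count w) =
      (pvAdjGet acc q).count w + (if q = p ∧ w = v then 1 else 0) := by
  rw [pvAdjGet_app acc n p q v hacc hp0 hp1 hq0 hq1]
  by_cases hqp : q = p
  · subst hqp
    simp [List.count_append, List.count_singleton]
    by_cases hwv : w = v
    · simp [hwv]
    · simp [hwv, Ne.symm hwv]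
  · simp [hqp]

theorem pvIteComm (a b c d : Int) :
    (if a = b ∧ c = d then (1 : Nat) else 0) = (if c = d ∧ a = b then 1 else 0) := by
  by_cases h : a = b ∧ c = d
  · rw [if_pos h, if_pos ⟨h.2, h.1⟩]
  · rw [if_neg h, if_neg (fun hh => h ⟨hh.2, hh.1⟩)]

-- all invariants of the adjacency fold at once
theorem adj_fold_inv (n : Int) (l : List (Int × Int))
    (hl : ∀ e ∈ l, 0 ≤ e.1 ∧ e.1 < n ∧ 0 ≤ e.2 ∧ e.2 < n) :
    ∀ acc : List (List Int), acc.length = n.toNat →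
    (∀ i j : Int, 0 ≤ i → i < n → 0 ≤ j → j < n →
      (pvAdjGet acc i).count j = (pvAdjGet acc j).count i) →
    (∀ L ∈ acc, ∀ x ∈ L, 0 ≤ x ∧ x < n) →
    (∀ i : Int, 0 ≤ i → i < n → (pvAdjGet acc i).count i % 2 = 0) →
    (let r := l.foldl (fun adj e => pvAdjApp (pvAdjApp adj e.1 e.2) e.2 e.1) acc
     r.length = n.toNat ∧
     (∀ i j : Int, 0 ≤ i → i < n → 0 ≤ j → j < n →
        (pvAdjGet r i).count j = (pvAdjGet r j).count i) ∧
     (∀ L ∈ r, ∀ x ∈ L, 0 ≤ x ∧ x < n) ∧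
     (∀ i : Int, 0 ≤ i → i < n → (pvAdjGet r i).count i % 2 = 0)) := by
  induction l with
  | nil => intro acc h1 h2 h3 h4; exact ⟨h1, h2, h3, h4⟩
  | cons e t ih =>
    intro acc h1 h2 h3 h4
    obtain ⟨ha0, ha1, hb0, hb1⟩ := hl e (by simp)
    have hl' : ∀ e ∈ t, 0 ≤ e.1 ∧ e.1 < n ∧ 0 ≤ e.2 ∧ e.2 < n := fun x hx => hl x (by simp [hx])
    simp only [List.foldl_cons]
    set acc1 := pvAdjApp acc e.1 e.2 with hacc1
    set acc2 := pvAdjApp acc1 e.2 e.1 with hacc2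
    have hlen1 : acc1.length = n.toNat := by rw [hacc1, pvAdjApp_length]; exact h1
    have hlen2 : acc2.length = n.toNat := by rw [hacc2, pvAdjApp_length]; exact hlen1
    have hget1 : ∀ q : Int, 0 ≤ q → q < n →
        pvAdjGet acc1 q = if q = e.1 then pvAdjGet acc e.1 ++ [e.2] else pvAdjGet acc q := by
      intro q hq0 hq1; rw [hacc1]; exact pvAdjGet_app acc n e.1 q e.2 h1 ha0 ha1 hq0 hq1
    have hget2 : ∀ q : Int, 0 ≤ q → q < n →
        pvAdjGet acc2 q = if q = e.2 then pvAdjGet acc1 e.2 ++ [e.1] else pvAdjGet acc1 q := by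
      intro q hq0 hq1; rw [hacc2]; exact pvAdjGet_app acc1 n e.2 q e.1 hlen1 hb0 hb1 hq0 hq1
    refine ih hl' acc2 hlen2 ?_ ?_ ?_
    · -- symmetry of counts
      intro i j hi0 hi1 hj0 hj1
      have k1 : ∀ q w : Int, 0 ≤ q → q < n →
          (pvAdjGet acc2 q).count w = (pvAdjGet acc q).count w +
            ((if q = e.1 ∧ w = e.2 then 1 else 0) + (if q = e.2 ∧ w = e.1 then 1 else 0)) := by
        intro q w hq0 hq1
        rw [hacc2, pvCount_app acc1 n e.2 q e.1 w hlen1 hb0 hb1 hq0 hq1,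
            hacc1, pvCount_app acc n e.1 q e.2 w h1 ha0 ha1 hq0 hq1]
        omega
      rw [k1 i j hi0 hi1, k1 j i hj0 hj1, h2 i j hi0 hi1 hj0 hj1,
        pvIteComm i e.1 j e.2, pvIteComm i e.2 j e.1]
      omega
    · -- entries in range
      exact pvAdjApp_range acc1 e.2 e.1 hb0 _
        (pvAdjApp_range acc e.1 e.2 ha0 _ h3 ⟨hb0, hb1⟩) ⟨ha0, ha1⟩
    · -- even self count
      intro i hi0 hi1
      have k1 : (pvAdjGet acc2 i).count i = (pvAdjGet acc i).count i +
          ((if i = e.1 ∧ i = e.2 then 1 else 0) + (if i = e.2 ∧ i = e.1 then 1 else 0)) := by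
        rw [hacc2, pvCount_app acc1 n e.2 i e.1 i hlen1 hb0 hb1 hi0 hi1,
            hacc1, pvCount_app acc n e.1 i e.2 i h1 ha0 ha1 hi0 hi1]
        omega
      rw [k1, pvIteComm i e.1 i e.2]
      have := h4 i hi0 hi1
      omega

-- bundled facts about the adjacency structure actually used below
structure PvAdjFacts (adj : List (List Int)) (n : Int) : Prop where
  hlen : adj.length = n.toNat
  hsym : ∀ i j : Int, 0 ≤ i → i < n → 0 ≤ j → j < n →
    (pvAdjGet adj i).count j = (pvAdjGet adj j).count i
  hrange : ∀ v x : Int, x ∈ pvAdjGet adj v → 0 ≤ x ∧ x < n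
  heven : ∀ i : Int, 0 ≤ i → i < n → (pvAdjGet adj i).count i % 2 = 0

theorem adjacency_facts (n : Int) (edges : List (Int × Int))
    (hl : ∀ e ∈ edges, 0 ≤ e.1 ∧ e.1 < n ∧ 0 ≤ e.2 ∧ e.2 < n) :
    PvAdjFacts (adjacency_list n edges) n := by
  have base1 : (List.replicate n.toNat ([] : List Int)).length = n.toNat := by simp
  have h := adj_fold_inv n edges hl (List.replicate n.toNat []) base1
    (by intro i j hi0 hi1 hj0 hj1
        rw [pvAdjGet_replicate n i hi0 hi1, pvAdjGet_replicate n j hj0 hj1]; rfl)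
    (by intro L hL x hx
        rw [List.eq_of_mem_replicate hL] at hx
        simp at hx)
    (by intro i hi0 hi1
        rw [pvAdjGet_replicate n i hi0 hi1]
        simp)
  obtain ⟨h1, h2, h3, h4⟩ := h
  refine ⟨h1, h2, ?_, h4⟩
  intro v x hx
  by_cases hin : PySem.Raise.InRange (adjacency_list n edges).length v
  · exact h3 _ (PySem.List.pyGetD_mem _ [] hin) x hx
  · unfold pvAdjGet at hx
    rw [PySem.List.pyGetD_of_none _ v [] ((PySem.List.pyGet?_eq_none_iff _ v).2 hin)] at hx
    simp at hx

theorem pvMemSym (adj : List (List Int)) (n : Int) (hf : PvAdjFacts adj n)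
    (i j : Int) (hi0 : 0 ≤ i) (hi1 : i < n) (hj : j ∈ pvAdjGet adj i) :
    i ∈ pvAdjGet adj j := by
  obtain ⟨hj0, hj1⟩ := hf.hrange i j hj
  have : 0 < (pvAdjGet adj i).count j := List.count_pos_iff.2 hj
  rw [hf.hsym i j hi0 hi1 hj0 hj1] at this
  exact List.count_pos_iff.1 this

theorem pvTwoMem {l : List Int} {a b c : Int} (hlen : l.length = 2)
    (ha : a ∈ l) (hb : b ∈ l) (hab : a ≠ b) (hc : c ∈ l) : c = a ∨ c = b := by
  match l, hlen with
  | [x, y], _ =>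
    simp at ha hb hc
    rcases ha with ha | ha <;> rcases hb with hb | hb <;> rcases hc with hc | hc <;>
      subst ha <;> subst hc <;> tauto

-- self-loop characterisation: if v occurs in its own adjacency list of length 2, both slots are v
theorem pvSelfLoop (adj : List (List Int)) (n : Int) (hf : PvAdjFacts adj n)
    (v : Int) (hv0 : 0 ≤ v) (hv1 : v < n) (hdeg : (pvAdjGet adj v).length = 2)
    (hmem : v ∈ pvAdjGet adj v) : ∀ x ∈ pvAdjGet adj v, x = v := by
  have hpos : 0 < (pvAdjGet adj v).count v := List.count_pos_iff.2 hmem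
  have heven := hf.heven v hv0 hv1
  have hle : (pvAdjGet adj v).count v ≤ 2 := hdeg ▸ List.count_le_length
  have h2 : (pvAdjGet adj v).count v = 2 := by omega
  have := List.count_eq_length.1 (by rw [h2, hdeg])
  intro x hx
  exact (this x hx).symm

-- the crux: in a graph with all degrees 2, the walk cannot revisit a vertex before closing at 0
theorem pvStepNotMem (adj : List (List Int)) (n : Int) (hf : PvAdjFacts adj n)
    (hdeg : ∀ i : Int, 0 ≤ i → i < n → (pvAdjGet adj i).length = 2)
    (p : List Int) (hne : p ≠ []) (hnd : p.Nodup)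
    (hch : List.IsChain (fun a b => b ∈ pvAdjGet adj a) p)
    (hrg : ∀ x ∈ p, 0 ≤ x ∧ x < n)
    (h0 : p[0]'(by cases p <;> simp_all) = 0)
    (prev nxt : Int)
    (hprev : ∀ h2 : 2 ≤ p.length, prev = p[p.length - 2]'(by omega))
    (hadj : nxt ∈ pvAdjGet adj (p.getLast hne))
    (hnp : nxt ≠ prev) (hn0 : nxt ≠ 0) :
    nxt ∉ p := by
  intro hmem
  have hlp : 0 < p.length := List.length_pos_of_ne_nil hne
  obtain ⟨i, hi, hpi⟩ := List.getElem_of_mem hmem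
  set k := p.length - 1 with hk
  have hkl : k < p.length := by omega
  have hlast : p.getLast hne = p[k] := List.getLast_eq_getElem hne
  have hchain := List.isChain_iff_getElem.1 hch
  have hcrg := hrg (p[k]) (List.getElem_mem hkl)
  have hadj' : nxt ∈ pvAdjGet adj (p[k]) := by rw [← hlast]; exact hadj
  have hsymm : p[k] ∈ pvAdjGet adj nxt := pvMemSym adj n hf (p[k]) nxt hcrg.1 hcrg.2 hadj'
  have hine : i ≠ 0 := by
    intro h; subst h; rw [hpi] at h0; exact hn0 h0
  have hik : i ≤ k := by omega
  rcases eq_or_lt_of_le hik with hik' | hik'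
  · -- i = k : nxt = p[k], a self loop
    subst hik'
    have hv : nxt = p[k] := hpi.symm
    have hself : nxt ∈ pvAdjGet adj nxt := by rw [hv] at hadj' ⊢; exact hadj'
    have hnrg := hrg nxt hmem
    have hall := pvSelfLoop adj n hf nxt hnrg.1 hnrg.2 (hdeg nxt hnrg.1 hnrg.2) hself
    have h2l : 2 ≤ p.length := by omega
    have hchm : p[k] ∈ pvAdjGet adj (p[k-1]'(by omega)) := by
      have := hchain (k-1) (by omega)
      simpa [Nat.sub_add_cancel (by omega : 1 ≤ k)] using this
    have hprg := hrg (p[k-1]'(by omega)) (List.getElem_mem (by omega))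
    have hmemadj : p[k-1]'(by omega) ∈ pvAdjGet adj (p[k]) :=
      pvMemSym adj n hf _ _ hprg.1 hprg.2 hchm
    have heq : p[k-1]'(by omega) = nxt := by
      apply hall; rw [hv]; exact hmemadj
    rw [hv] at heq
    have := (List.Nodup.getElem_inj_iff hnd).1 heq
    omega
  · -- i < k
    by_cases hik2 : i = k - 1
    · -- nxt = p[k-1] = prev
      have h2l : 2 ≤ p.length := by omega
      have hieq : i = p.length - 2 := by omega
      apply hnp
      rw [hprev h2l, ← hpi]
      subst hieq
      rfl
    · -- 1 ≤ i ≤ k-2 : p[i]'s two neighbours are p[i-1] and p[i+1], but p[k] is also one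
      have hi1 : 1 ≤ i := by omega
      have hi2 : i + 1 ≤ k - 1 := by omega
      have hirg := hrg (p[i]) (List.getElem_mem (by omega))
      have ha : p[i-1]'(by omega) ∈ pvAdjGet adj (p[i]) := by
        have hch1 : p[i] ∈ pvAdjGet adj (p[i-1]'(by omega)) := by
          have := hchain (i-1) (by omega)
          simpa [Nat.sub_add_cancel hi1] using this
        have hprg := hrg (p[i-1]'(by omega)) (List.getElem_mem (by omega))
        exact pvMemSym adj n hf _ _ hprg.1 hprg.2 hch1
      have hb : p[i+1]'(by omega) ∈ pvAdjGet adj (p[i]) := hchain i (by omega)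
      have hab : p[i-1]'(by omega) ≠ p[i+1]'(by omega) := by
        intro h
        have := (List.Nodup.getElem_inj_iff hnd).1 h
        omega
      have hcm : p[k] ∈ pvAdjGet adj (p[i]) := by rw [← hpi] at hsymm; exact hsymm
      rcases pvTwoMem (hdeg (p[i]) hirg.1 hirg.2) ha hb hab hcm with h | h
      · have := (List.Nodup.getElem_inj_iff hnd).1 h; omega
      · have := (List.Nodup.getElem_inj_iff hnd).1 h; omega

-- if B's walk returns a tour, that tour has n distinct in-range vertices, is an adjacency chain
-- starting at 0
theorem pvWalkB_sound (adj : List (List Int)) (n : Int) (hf : PvAdjFacts adj n)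
    (hdeg : ∀ i : Int, 0 ≤ i → i < n → (pvAdjGet adj i).length = 2) :
    ∀ (fuel : Nat) (tour : List Int) (prev curr : Int) (t : List Int),
    tour.Nodup →
    (curr ∉ tour ∨ curr = 0) →
    (∀ x ∈ tour, 0 ≤ x ∧ x < n) → (0 ≤ curr ∧ curr < n) →
    List.IsChain (fun a b => b ∈ pvAdjGet adj a) (tour ++ [curr]) →
    (tour ++ [curr])[0]'(by simp) = 0 →
    (∀ h : tour ≠ [], prev = tour.getLast h) →
    pvWalkB adj n fuel tour prev curr = some t →
    t.Nodup ∧ (t.length : Int) = n ∧ (∀ x ∈ t, 0 ≤ x ∧ x < n) ∧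
      List.IsChain (fun a b => b ∈ pvAdjGet adj a) t ∧ t[0]? = some 0 := by
  intro fuel
  induction fuel with
  | zero => intro tour prev curr t _ _ _ _ _ _ _ heq; simp [pvWalkB] at heq
  | succ fuel ih =>
    intro tour prev curr t hnd hcur hrg hcrg hch h0 hprev heq
    simp only [pvWalkB] at heq
    by_cases hcond : curr ≠ 0 ∨ tour = []
    · rw [if_pos hcond] at heq
      by_cases hovl : (tour.length : Int) ≥ n
      · rw [if_pos hovl] at heq; exact absurd heq (by simp)
      · rw [if_neg hovl] at heq
        obtain ⟨x, y, hxy⟩ := List.length_eq_two.1 (hdeg curr hcrg.1 hcrg.2)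
        rw [hxy] at heq
        simp only at heq
        set nxt := if x = prev then y else x with hnxt
        by_cases hnp : nxt = prev
        · rw [if_pos hnp] at heq; exact absurd heq (by simp)
        · rw [if_neg hnp] at heq
          -- invariants for the next state
          have hcnin : curr ∉ tour := by
            rcases hcur with h | h
            · exact h
            · rcases hcond with hc | hc
              · exact absurd h hc
              · rw [hc]; simp
          have hnd' : (tour ++ [curr]).Nodup := by
            simp [List.nodup_append, hnd]
            exact fun a ha hac => hcnin (hac ▸ ha)
          have hnmem : nxt ∈ pvAdjGet adj curr := by
            rw [hxy, hnxt]
            by_cases hxp : x = prev <;> simp [hxp]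
          have hnrg := hf.hrange curr nxt hnmem
          have hrg' : ∀ z ∈ tour ++ [curr], 0 ≤ z ∧ z < n := by
            intro z hz
            rcases List.mem_append.1 hz with hz | hz
            · exact hrg z hz
            · simp at hz; subst hz; exact hcrg
          have hlast : (tour ++ [curr]).getLast (by simp) = curr := by
            simp
          have hprev2 : ∀ h2 : 2 ≤ (tour ++ [curr]).length,
              prev = (tour ++ [curr])[(tour ++ [curr]).length - 2]'(by omega) := by
            intro h2
            have htne : tour ≠ [] := by
              intro h; rw [h] at h2; simp at h2
            have hlt : tour.length - 1 < tour.length := by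
              have := List.length_pos_of_ne_nil htne; omega
            rw [hprev htne]
            rw [List.getElem_append_left (by simp only [List.length_append, List.length_cons, List.length_nil]; omega)]
            rw [List.getLast_eq_getElem]
            congr 1
            simp only [List.length_append, List.length_cons, List.length_nil]
            omega
          have hncur : nxt ∉ tour ++ [curr] ∨ nxt = 0 := by
            by_cases hn0 : nxt = 0
            · right; exact hn0
            · left
              exact pvStepNotMem adj n hf hdeg (tour ++ [curr]) (by simp) hnd' hch hrg'
                h0 prev nxt hprev2 (hlast ▸ hnmem) hnp hn0
          have hch' : List.IsChain (fun a b => b ∈ pvAdjGet adj a) ((tour ++ [curr]) ++ [nxt]) := by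
            rw [List.isChain_append]
            refine ⟨hch, by simp, ?_⟩
            intro a ha b hb
            simp at hb; subst hb
            simp at ha
            subst ha
            exact hnmem
          have h0' : ((tour ++ [curr]) ++ [nxt])[0]'(by simp) = 0 := by
            rw [List.getElem_append_left (by simp only [List.length_append, List.length_cons, List.length_nil]; omega)]
            exact h0
          have hcur' : nxt ∉ (tour ++ [curr]) ∨ nxt = 0 := hncur
          exact ih (tour ++ [curr]) curr nxt t hnd' hcur' hrg' ⟨hnrg.1, hnrg.2⟩ hch' h0'
            (by intro h; simp) heq
    · rw [if_neg hcond] at heq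
      push_neg at hcond
      obtain ⟨hc0, htne⟩ := hcond
      by_cases hlen : (tour.length : Int) = n
      · rw [if_pos hlen] at heq
        have ht : tour = t := by injection heq
        subst ht
        refine ⟨hnd, hlen, hrg, ?_, ?_⟩
        · exact hch.prefix (List.prefix_append tour [curr])
        · have hlt : 0 < tour.length := List.length_pos_of_ne_nil htne
          rw [List.getElem?_eq_getElem hlt]
          rw [List.getElem_append_left hlt] at h0
          rw [h0]
      · rw [if_neg hlen] at heq; exact absurd heq (by simp)

theorem pvNodupLen (n : Int) (s : List Int) (hnd : s.Nodup)
    (hrg : ∀ v ∈ s, 0 ≤ v ∧ v < n) : s.length ≤ n.toNat := by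
  have hsub : s.toFinset ⊆ Finset.Ico (0 : Int) n := by
    intro v hv
    rw [List.mem_toFinset] at hv
    rw [Finset.mem_Ico]
    exact ⟨(hrg v hv).1, (hrg v hv).2⟩
  have := Finset.card_le_card hsub
  rw [List.toFinset_card_of_nodup hnd, Int.card_Ico] at this
  omega

theorem pvFull (n : Int) (t : List Int) (hnd : t.Nodup)
    (hrg : ∀ v ∈ t, 0 ≤ v ∧ v < n) (hlen : t.length = n.toNat) :
    ∀ v : Int, 0 ≤ v → v < n → v ∈ t := by
  have hsub : t.toFinset ⊆ Finset.Ico (0 : Int) n := by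
    intro v hv
    rw [List.mem_toFinset] at hv
    rw [Finset.mem_Ico]
    exact ⟨(hrg v hv).1, (hrg v hv).2⟩
  have hcard : (Finset.Ico (0 : Int) n).card ≤ t.toFinset.card := by
    rw [List.toFinset_card_of_nodup hnd, Int.card_Ico]
    omega
  have heq := Finset.eq_of_subset_of_card_le hsub hcard
  intro v hv0 hv1
  have : v ∈ t.toFinset := by
    rw [heq, Finset.mem_Ico]
    exact ⟨hv0, hv1⟩
  rwa [List.mem_toFinset] at this

theorem pvDfs_spec (adj : List (List Int)) (n : Int)
    (hdeg : ∀ i : Int, 0 ≤ i → i < n → (pvAdjGet adj i).length = 2)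
    (hrange : ∀ v x : Int, x ∈ pvAdjGet adj v → 0 ≤ x ∧ x < n) :
    ∀ (fuel : Nat) (stack seen : List Int),
    stack.length + 2 * (n.toNat - seen.length) ≤ fuel →
    (∀ v ∈ stack, 0 ≤ v ∧ v < n) →
    seen.Nodup → (∀ v ∈ seen, 0 ≤ v ∧ v < n) →
    (∀ x ∈ seen, ∀ y ∈ pvAdjGet adj x, y ∈ seen ∨ y ∈ stack) →
    (∀ x ∈ seen, x ∈ pvDfs adj fuel stack seen) ∧
    (∀ v ∈ stack, v ∈ pvDfs adj fuel stack seen) ∧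
    (∀ x ∈ pvDfs adj fuel stack seen, ∀ y ∈ pvAdjGet adj x, y ∈ pvDfs adj fuel stack seen) ∧
    (pvDfs adj fuel stack seen).Nodup ∧
    (∀ v ∈ pvDfs adj fuel stack seen, 0 ≤ v ∧ v < n) := by
  intro fuel
  induction fuel with
  | zero =>
    intro stack seen hm hstk hsnd hsrg hclo
    have hse : stack = [] := by
      have : stack.length = 0 := by omega
      exact List.eq_nil_of_length_eq_zero this
    subst hse
    simp only [pvDfs]
    refine ⟨fun x hx => hx, by simp, ?_, hsnd, hsrg⟩
    intro x hx y hy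
    rcases hclo x hx y hy with h | h
    · exact h
    · simp at h
  | succ fuel ih =>
    intro stack seen hm hstk hsnd hsrg hclo
    rcases List.eq_nil_or_concat stack with hse | ⟨st, v, hse⟩
    · subst hse
      simp only [pvDfs, PySem.List.pop?]
      refine ⟨fun x hx => hx, by simp, ?_, hsnd, hsrg⟩
      intro x hx y hy
      rcases hclo x hx y hy with h | h
      · exact h
      · simp at h
    · subst hse
      rw [List.concat_eq_append] at *
      have hstep : pvDfs adj (fuel+1) (st ++ [v]) seen =
          (if PySem.Set.contains seen v then pvDfs adj fuel st seen
           else pvDfs adj fuel (st ++ pvAdjGet adj v) (PySem.Set.add seen v)) := by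
        simp only [pvDfs, PySem.List.pop?_last]
      have hvrg := hstk v (by simp)
      by_cases hv : v ∈ seen
      · rw [hstep, if_pos (by rw [PySem.Set.contains_iff]; exact hv)]
        have hm' : st.length + 2 * (n.toNat - seen.length) ≤ fuel := by
          simp only [List.length_append, List.length_cons, List.length_nil] at hm; omega
        have hstk' : ∀ w ∈ st, 0 ≤ w ∧ w < n := fun w hw => hstk w (by simp [hw])
        have hclo' : ∀ x ∈ seen, ∀ y ∈ pvAdjGet adj x, y ∈ seen ∨ y ∈ st := by
          intro x hx y hy
          rcases hclo x hx y hy with h | h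
          · exact Or.inl h
          · rcases List.mem_append.1 h with h | h
            · exact Or.inr h
            · simp at h; subst h; exact Or.inl hv
        obtain ⟨c1, c2, c3, c4, c5⟩ := ih st seen hm' hstk' hsnd hsrg hclo'
        refine ⟨c1, ?_, c3, c4, c5⟩
        intro w hw
        rcases List.mem_append.1 hw with h | h
        · exact c2 w h
        · simp at h; subst h; exact c1 w hv
      · rw [hstep, if_neg (by rw [PySem.Set.contains_iff]; exact hv),
            PySem.Set.add_of_not_mem hv]
        have hsnd' : (seen ++ [v]).Nodup := by
          simp [List.nodup_append, hsnd]
          exact fun a ha hav => hv (hav ▸ ha)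
        have hsrg' : ∀ w ∈ seen ++ [v], 0 ≤ w ∧ w < n := by
          intro w hw
          rcases List.mem_append.1 hw with h | h
          · exact hsrg w h
          · simp at h; subst h; exact hvrg
        have hslen : (seen ++ [v]).length ≤ n.toNat := pvNodupLen n _ hsnd' hsrg'
        have hdv : (pvAdjGet adj v).length = 2 := hdeg v hvrg.1 hvrg.2
        have hm' : (st ++ pvAdjGet adj v).length + 2 * (n.toNat - (seen ++ [v]).length) ≤ fuel := by
          simp only [List.length_append, List.length_cons, List.length_nil, hdv] at hm hslen ⊢
          omega
        have hstk' : ∀ w ∈ st ++ pvAdjGet adj v, 0 ≤ w ∧ w < n := by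
          intro w hw
          rcases List.mem_append.1 hw with h | h
          · exact hstk w (by simp [h])
          · exact hrange v w h
        have hclo' : ∀ x ∈ seen ++ [v], ∀ y ∈ pvAdjGet adj x, y ∈ seen ++ [v] ∨ y ∈ st ++ pvAdjGet adj v := by
          intro x hx y hy
          rcases List.mem_append.1 hx with h | h
          · rcases hclo x h y hy with h' | h'
            · exact Or.inl (by simp [h'])
            · rcases List.mem_append.1 h' with h'' | h''
              · exact Or.inr (by simp [h''])
              · simp at h''; subst h''; exact Or.inl (by simp)
          · simp at h; subst h
            exact Or.inr (by simp [hy])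
        obtain ⟨c1, c2, c3, c4, c5⟩ := ih (st ++ pvAdjGet adj v) (seen ++ [v]) hm' hstk' hsnd' hsrg' hclo'
        refine ⟨?_, ?_, c3, c4, c5⟩
        · intro x hx; exact c1 x (by simp [hx])
        · intro w hw
          rcases List.mem_append.1 hw with h | h
          · exact c2 w (by simp [h])
          · simp at h; subst h; exact c1 _ (by simp)

theorem pvChainSubset (adj : List (List Int)) (S : List Int)
    (hclo : ∀ x ∈ S, ∀ y ∈ pvAdjGet adj x, y ∈ S) :
    ∀ t : List Int, List.IsChain (fun a b => b ∈ pvAdjGet adj a) t →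
    ∀ z, t[0]? = some z → z ∈ S → ∀ x ∈ t, x ∈ S := by
  intro t
  induction t with
  | nil => intro _ z hz _ x hx; simp at hx
  | cons a rest ih =>
    intro hch z hz hzS x hx
    simp at hz
    subst hz
    rcases List.mem_cons.1 hx with h | h
    · subst h; exact hzS
    · match rest, hch, h with
      | b :: rest', hch', h' =>
        have hab : b ∈ pvAdjGet adj a := (List.isChain_cons_cons.1 hch').1
        exact ih (List.isChain_cons_cons.1 hch').2 b rfl (hclo a hzS b hab) x h'

theorem pvWalkB_one_none (adj : List (List Int)) (n : Int) (t : List Int) (p c : Int)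
    (hc : c ≠ 0 ∨ t = []) : pvWalkB adj n 1 t p c = none := by
  simp only [pvWalkB, if_pos hc]
  by_cases hov : (t.length : Int) ≥ n
  · rw [if_pos hov]
  · rw [if_neg hov]
    rcases hL : pvAdjGet adj c with _ | ⟨a, _ | ⟨b, _ | _⟩⟩ <;> simp only
    by_cases hp : (if a = p then b else a) = p <;> simp [hp, pvWalkB]

theorem pvWalkB_exit (adj : List (List Int)) (n : Int) (f : Nat) (t : List Int) (p : Int)
    (ht : t ≠ []) : pvWalkB adj n (f+1) t p 0 =
      (if (t.length : Int) = n then some t else none) := by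
  simp only [pvWalkB, if_neg (by simp [ht] : ¬((0:Int) ≠ 0 ∨ t = []))]

theorem pvWalkB_over (adj : List (List Int)) (n : Int) (f : Nat) (t : List Int) (p c : Int)
    (hc : c ≠ 0 ∨ t = []) (hov : (t.length : Int) ≥ n) : pvWalkB adj n (f+1) t p c = none := by
  simp only [pvWalkB, if_pos hc, if_pos hov]

-- A takes one step to none whenever the tour (without curr) has already reached length n
theorem pvWalkA_over (adj : List (List Int)) (n : Int) (fuel : Nat) (tour : List Int)
    (prev curr : Int) (hov : (tour.length : Int) ≥ n) :
    pvWalkA adj n (fuel+1) (tour ++ [curr]) prev curr = none := by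
  simp only [pvWalkA]
  cases hF : (pvAdjGet adj curr).filter (fun u => u != prev) with
  | nil => rfl
  | cons nxt rest =>
    simp only
    by_cases h0 : nxt = 0
    · rw [if_pos h0, if_neg]
      simp only [List.length_append, List.length_cons, List.length_nil]
      push_cast
      omega
    · rw [if_neg h0, if_pos]
      simp only [List.length_append, List.length_cons, List.length_nil]
      push_cast
      omega

-- A's walk and B's walk compute the same value, in lockstep (A carries curr at the end of its tour)
theorem pvWalk_eq (adj : List (List Int)) (n : Int)
    (hdeg : ∀ i : Int, 0 ≤ i → i < n → (pvAdjGet adj i).length = 2)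
    (hrange : ∀ v x : Int, x ∈ pvAdjGet adj v → 0 ≤ x ∧ x < n) :
    ∀ (fuel : Nat) (tour : List Int) (prev curr : Int),
    0 ≤ curr → curr < n → (curr = 0 → tour = []) →
    pvWalkA adj n fuel (tour ++ [curr]) prev curr = pvWalkB adj n (fuel+1) tour prev curr := by
  intro fuel
  induction fuel with
  | zero =>
    intro tour prev curr _ _ hc0
    rw [pvWalkB_one_none adj n tour prev curr (by tauto)]
    simp [pvWalkA]
  | succ fuel ih =>
    intro tour prev curr hc1 hc2 hc0
    obtain ⟨x, y, hxy⟩ := List.length_eq_two.1 (hdeg curr hc1 hc2)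
    have hcond : curr ≠ 0 ∨ tour = [] := by tauto
    conv_rhs => rw [pvWalkB]
    rw [if_pos hcond]
    by_cases hov : (tour.length : Int) ≥ n
    · rw [if_pos hov, pvWalkA_over adj n fuel tour prev curr hov]
    · rw [if_neg hov]
      simp only [hxy]
      have hstep : ∀ v0 : Int, v0 ∈ pvAdjGet adj curr → v0 ≠ prev →
          (if v0 = 0 then (if ((tour ++ [curr]).length : Int) = n then some (tour ++ [curr]) else none)
           else
            if (((tour ++ [curr]) ++ [v0]).length : Int) > n then none
            else pvWalkA adj n fuel ((tour ++ [curr]) ++ [v0]) curr v0) =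
          pvWalkB adj n (fuel+1) (tour ++ [curr]) curr v0 := by
        intro v0 hv0m hv0p
        obtain ⟨hv01, hv02⟩ := hrange curr v0 hv0m
        by_cases h0 : v0 = 0
        · rw [if_pos h0, h0, pvWalkB_exit adj n fuel (tour ++ [curr]) curr (by simp)]
        · rw [if_neg h0]
          by_cases hov2 : (((tour ++ [curr]) ++ [v0]).length : Int) > n
          · rw [if_pos hov2, pvWalkB_over adj n fuel (tour ++ [curr]) curr v0 (Or.inl h0)]
            simp only [List.length_append, List.length_cons, List.length_nil] at hov2 ⊢
            push_cast at hov2 ⊢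
            omega
          · rw [if_neg hov2]
            exact ih (tour ++ [curr]) curr v0 hv01 hv02 (fun h => absurd h h0)
      by_cases hxp : x = prev
      · by_cases hyp : y = prev
        · have hfil : [x,y].filter (fun u => u != prev) = [] := by simp [hxp, hyp]
          have hnxt : (if x = prev then y else x) = prev := by rw [if_pos hxp, hyp]
          simp only [pvWalkA, hxy, hfil, hnxt]
          simp
        · have hfil : [x,y].filter (fun u => u != prev) = [y] := by simp [hxp, hyp]
          have hnxt : (if x = prev then y else x) = y := if_pos hxp
          simp only [pvWalkA, hxy, hfil, hnxt]
          rw [if_neg hyp]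
          exact hstep y (by rw [hxy]; simp) hyp
      · have hfil : [x,y].filter (fun u => u != prev) = x :: [y].filter (fun u => u != prev) := by
          simp [List.filter_cons, hxp]
        have hnxt : (if x = prev then y else x) = x := if_neg hxp
        simp only [pvWalkA, hxy, hfil, hnxt]
        rw [if_neg hxp]
        exact hstep x (by rw [hxy]; simp) hxp

theorem main_equal (n : Int) (edges : List (Int × Int)) (hpre : Pre_edges_to_tour n edges) :
    edges_to_tour n edges = edges_to_tour_alt n edges := by
  by_cases hE : (edges.length : Int) = n
  · obtain ⟨hn1, hlab⟩ := hpre hE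
    have hne : ¬((edges.length : Int) ≠ n) := fun h => h hE
    have hf := adjacency_facts n edges hlab
    set adj := adjacency_list n edges with hadj
    have hadjB : edges.foldl (fun adj e => pvAdjApp (pvAdjApp adj e.1 e.2) e.2 e.1)
        (List.replicate n.toNat []) = adj := rfl
    have hdegEq : ((PySem.List.pyRange 0 n).any (fun v => (pvAdjGet adj v).length != 2)) =
        (adj.any fun nbrs => nbrs.length != 2) := by
      rw [Bool.eq_iff_iff]
      simp only [List.any_eq_true, bne_iff_ne, ne_eq]
      constructor
      · rintro ⟨v, hv, hne2⟩
        rw [PySem.List.mem_pyRange_one] at hv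
        refine ⟨adj[v.toNat]'(by rw [hf.hlen]; omega), List.getElem_mem _, ?_⟩
        rwa [pvAdjGet, PySem.List.pyGetD_eq_getElem adj [] hv.1 (by rw [hf.hlen]; omega)] at hne2
      · rintro ⟨L, hL, hne2⟩
        obtain ⟨k, hk, hLk⟩ := List.mem_iff_getElem.1 hL
        refine ⟨(k : Int), ?_, ?_⟩
        · rw [PySem.List.mem_pyRange_one]
          constructor
          · omega
          · rw [hf.hlen] at hk; omega
        · rw [pvAdjGet, PySem.List.pyGetD_eq_getElem adj [] (by omega)
            (by rw [hf.hlen] at hk ⊢; omega)]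
          simpa [hLk] using hne2
    by_cases hdegA : ((PySem.List.pyRange 0 n).any (fun v => (pvAdjGet adj v).length != 2)) = true
    · -- a degree check fails: both sides return none
      have hstc0 : single_tour_check n edges = false := by
        simp only [single_tour_check]
        rw [← hadj, if_neg hne, if_pos hdegA]
      have hB : edges_to_tour_alt n edges = none := by
        simp only [edges_to_tour_alt]
        rw [hadjB, if_neg hne, if_pos (hdegEq ▸ hdegA)]
      rw [hB]
      simp only [edges_to_tour]
      rw [hstc0]
      simp
    · have hdegA' : ¬((PySem.List.pyRange 0 n).any (fun v => (pvAdjGet adj v).length != 2) = true) := hdegA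
      have hdegB : ¬((adj.any fun nbrs => nbrs.length != 2) = true) := fun h => hdegA (hdegEq ▸ h)
      have hdeg : ∀ i : Int, 0 ≤ i → i < n → (pvAdjGet adj i).length = 2 := by
        intro i hi0 hi1
        by_contra hne2
        apply hdegA
        simp only [List.any_eq_true, bne_iff_ne, ne_eq]
        exact ⟨i, PySem.List.mem_pyRange_one.2 ⟨hi0, hi1⟩, hne2⟩
      have hwalk : pvWalkA adj n (n.toNat + 1) [0] (-1) 0 = pvWalkB adj n (n.toNat + 2) [] (-1) 0 := by
        have := pvWalk_eq adj n hdeg hf.hrange (n.toNat + 1) [] (-1) 0 le_rfl (by omega) (fun _ => rfl)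
        simpa using this
      obtain ⟨c1, c2, c3, c4, c5⟩ := pvDfs_spec adj n hdeg hf.hrange (2 * n.toNat + 2) [0] []
        (by simp; omega) (by intro v hv; simp at hv; subst hv; constructor <;> omega)
        (by simp) (by simp) (by simp)
      set S := pvDfs adj (2 * n.toNat + 2) [0] [] with hS
      have hstc : single_tour_check n edges = ((S.length : Int) == n) := by
        simp only [single_tour_check]
        rw [← hadj, if_neg hne, if_neg hdegA']
        rfl
      have hB : edges_to_tour_alt n edges = pvWalkB adj n (n.toNat + 2) [] (-1) 0 := by
        simp only [edges_to_tour_alt]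
        rw [hadjB, if_neg hne, if_neg hdegB]
      have hA : edges_to_tour n edges =
          (if single_tour_check n edges = true then pvWalkA adj n (n.toNat + 1) [0] (-1) 0 else none) := by
        simp only [edges_to_tour]
        rw [← hadj]
        cases h : single_tour_check n edges <;> simp [h]
      rw [hA, hB]
      cases hw : pvWalkB adj n (n.toNat + 2) [] (-1) 0 with
      | none =>
        rw [hwalk, hw]
        simp
      | some t =>
        have hsound := pvWalkB_sound adj n hf hdeg (n.toNat + 2) [] (-1) 0 t
          List.nodup_nil (Or.inr rfl) (by simp) ⟨le_rfl, by omega⟩ (by simp)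
          (by simp) (fun h => absurd rfl h) hw
        obtain ⟨htnd, htlen, htrg, htch, ht0⟩ := hsound
        have htlen' : t.length = n.toNat := by omega
        have hfull := pvFull n t htnd htrg htlen'
        have h0S : (0 : Int) ∈ S := c2 0 (by simp)
        have htS : ∀ x ∈ t, x ∈ S := pvChainSubset adj S c3 t htch 0 ht0 h0S
        have hSlen : S.length = n.toNat := by
          have hle := pvNodupLen n S c4 c5
          have hsub : Finset.Ico (0 : Int) n ⊆ S.toFinset := by
            intro v hv
            rw [Finset.mem_Ico] at hv
            rw [List.mem_toFinset]
            exact htS v (hfull v hv.1 hv.2)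
          have := Finset.card_le_card hsub
          rw [List.toFinset_card_of_nodup c4, Int.card_Ico] at this
          omega
        have hchk : single_tour_check n edges = true := by
          rw [hstc, beq_iff_eq, hSlen]; omega
        rw [if_pos hchk, hwalk, hw]
  · have hE' : (edges.length : Int) ≠ n := hE
    have hstc0 : single_tour_check n edges = false := by
      simp only [single_tour_check]
      rw [if_pos hE']
    have hB : edges_to_tour_alt n edges = none := by
      simp only [edges_to_tour_alt]
      rw [if_pos hE']
    rw [hB]
    simp only [edges_to_tour]
    rw [hstc0]
    simp

-- ===== VERDICT (by name: the statement is the Claim_ definition above) =====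
theorem edges_to_tour_spec : Claim_equal_edges_to_tour := by
  intro n edges _ hpre
  unfold Spec_edges_to_tour
  exact main_equal n edges hpre
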